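-- pv_equiv track=rewrite | github.com/LGeoff31/leetcode-solutions | 990-satisfiability-of-equality-equations/990. Satisfiability of Equality Equations.py | equationsPossible
-- ===== SOURCE A (Python) =====
-- from typing import List
--
-- class UnionFind:
--     def __init__(self):
--         self.parent = {}
--         self.size = {}
--
--     def find(self, x):
--         self.parent.setdefault(x,x)
--         self.size.setdefault(x, 1)
--         if self.parent[x] != x:
--             self.parent[x] = self.find(self.parent[x])
--         return self.parent[x]
--     def union(self, x, y):
--         p_x = self.find(x)
--         p_y = self.find(y)
--         if p_x != p_y:
--             if self.size[p_x] < self.size[p_y]: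
--                 p_x, p_y = p_y, p_x
--             self.size[p_x] += self.size[p_y]
--             self.parent[p_y] = p_x
--
-- def equationsPossible(equations: List[str]) -> bool:
--     uf = UnionFind()
--     for eq in equations:
--         if eq[1] == "=":
--             uf.union(eq[0], eq[-1])
--     for eq in equations:
--         if eq[1] == "!":
--             if uf.find(eq[0]) == uf.find(eq[-1]):
--                 return False
--     return True
-- ===== SOURCE B (Python) =====
-- from typing import List
--
-- def equationsPossible(equations: List[str]) -> bool:
--     # Quick-find: keep a leader (representative) for every seen variable and
--     # relabel a whole class eagerly on each '==' equation; no find recursion,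
--     # no path compression, no sizes.
--     leader = {}
--     for eq in equations:
--         if eq[1] == "=":
--             x, y = eq[0], eq[-1]
--             lx = leader.get(x, x)
--             ly = leader.get(y, y)
--             if lx != ly:
--                 for k, v in list(leader.items()):
--                     if v == ly:
--                         leader[k] = lx
--                 leader[x] = lx
--                 leader[y] = lx
--     for eq in equations:
--         if eq[1] == "!":
--             if leader.get(eq[0], eq[0]) == leader.get(eq[-1], eq[-1]):
--                 return False
--     return True
-- ===== Notes on version B (the rewrite author's own statement) =====
-- stated objective: alternative
-- what changed: Replaces A's size-balanced union-find with recursive path-compressing find by an eager quick-find: one leader dict mapping each seen variable to a class representative, relabelling the whole class on each '==' equation, so the '!=' scan is plain lookups with no recursion and no sizes.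
import Mathlib
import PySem

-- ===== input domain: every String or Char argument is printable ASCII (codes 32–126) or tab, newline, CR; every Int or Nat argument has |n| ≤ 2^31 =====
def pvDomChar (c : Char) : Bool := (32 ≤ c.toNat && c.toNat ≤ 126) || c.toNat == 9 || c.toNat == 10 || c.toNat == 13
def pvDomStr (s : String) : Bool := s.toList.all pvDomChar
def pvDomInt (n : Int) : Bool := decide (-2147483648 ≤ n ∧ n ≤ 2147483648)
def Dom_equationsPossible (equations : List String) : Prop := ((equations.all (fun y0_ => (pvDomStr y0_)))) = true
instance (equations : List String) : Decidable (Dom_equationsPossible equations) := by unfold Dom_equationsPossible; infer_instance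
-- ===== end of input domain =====

-- B replaces A's size-balanced union-find with path compression by an eager quick-find
-- (one leader per seen variable, whole-class relabelling on each '==' equation): same
-- return value on every input admitted by Pre_ (objective: alternative, not faster).

-- ===== PORT A =====
-- eq[1], eq[0], eq[-1]: exact whenever the string has ≥ 2 chars (Pre_); Python raises IndexError otherwise
def pvC0 (eq : String) : Char := (PySem.Str.pyGet? eq 0).getD ' '
def pvC1 (eq : String) : Char := (PySem.Str.pyGet? eq 1).getD ' '
def pvCL (eq : String) : Char := (PySem.Str.pyGet? eq (-1)).getD ' '

structure pvUF where
  parent : PySem.Dict Char Char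
  size : PySem.Dict Char Int
deriving Repr

-- UnionFind.find, with path compression; fuel is a totality device only (proved
-- sufficient below: under the loop invariant a parent chain has ≤ |keys| links)
def pvFind : Nat → pvUF → Char → pvUF × Char
  | 0, uf, x => (uf, x)  -- unreachable under the invariant (fuel proven sufficient)
  | fuel+1, uf, x =>
    let uf1 : pvUF := ⟨uf.parent.setdefault x x, uf.size.setdefault x (1 : Int)⟩
    let px := uf1.parent.getD x x  -- self.parent[x]: key present after setdefault, getD exact
    if px ≠ x then
      let res := pvFind fuel uf1 px
      (⟨res.1.parent.insert x res.2, res.1.size⟩, res.2)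
    else (uf1, x)

def pvFuel (uf : pvUF) : Nat := uf.parent.keys.length + 1

def pvUnion (uf : pvUF) (x y : Char) : pvUF :=
  let fx := pvFind (pvFuel uf) uf x
  let fy := pvFind (pvFuel fx.1) fx.1 y
  let uf2 := fy.1
  if fx.2 ≠ fy.2 then
    -- size lookups: both roots were visited by find, so the keys are present; getD exact
    let pq := if uf2.size.getD fx.2 1 < uf2.size.getD fy.2 1 then (fy.2, fx.2) else (fx.2, fy.2)
    ⟨uf2.parent.insert pq.2 pq.1,
     uf2.size.insert pq.1 (uf2.size.getD pq.1 1 + uf2.size.getD pq.2 1)⟩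
  else uf2

def pvCheck : pvUF → List String → Bool
  | _, [] => true
  | uf, eq :: rest =>
    if pvC1 eq = '!' then
      let fx := pvFind (pvFuel uf) uf (pvC0 eq)
      let fy := pvFind (pvFuel fx.1) fx.1 (pvCL eq)
      if fx.2 = fy.2 then false else pvCheck fy.1 rest
    else pvCheck uf rest

def equationsPossible (equations : List String) : Bool :=
  let uf := equations.foldl
    (fun uf eq => if pvC1 eq = '=' then pvUnion uf (pvC0 eq) (pvCL eq) else uf)
    ⟨PySem.Dict.empty, PySem.Dict.empty⟩
  pvCheck uf equations

-- ===== PORT B =====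
-- leader[k] = lx for every k currently labelled ly (iterating a snapshot of items)
def pvRelabel (L : PySem.Dict Char Char) (lx ly : Char) : PySem.Dict Char Char :=
  L.items.foldl (fun d kv => if kv.2 = ly then d.insert kv.1 lx else d) L

def pvBUnion (L : PySem.Dict Char Char) (x y : Char) : PySem.Dict Char Char :=
  let lx := L.getD x x
  let ly := L.getD y y
  if lx ≠ ly then ((pvRelabel L lx ly).insert x lx).insert y lx else L

def equationsPossible_alt (equations : List String) : Bool :=
  let L := equations.foldl
    (fun L eq => if pvC1 eq = '=' then pvBUnion L (pvC0 eq) (pvCL eq) else L)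
    PySem.Dict.empty
  equations.all (fun eq =>
    !(pvC1 eq == '!' && L.getD (pvC0 eq) (pvC0 eq) == L.getD (pvCL eq) (pvCL eq)))

-- ===== PRECONDITION & SPEC =====
-- Pre_ excludes exactly the inputs on which Python A raises IndexError: some equation
-- string shorter than 2 characters (A reads eq[1]).
def Pre_equationsPossible (equations : List String) : Prop :=
  ∀ eq ∈ equations, 2 ≤ eq.toList.length
instance (equations : List String) : Decidable (Pre_equationsPossible equations) := by
  unfold Pre_equationsPossible; infer_instance

def pvWitness_equationsPossible : List String := ["a==b", "b!=c"]

def Spec_equationsPossible (equations : List String) (out : Bool) : Prop :=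
  out = equationsPossible_alt equations
instance (equations : List String) (out : Bool) : Decidable (Spec_equationsPossible equations out) := by
  unfold Spec_equationsPossible; infer_instance

-- ===== CLAIM (what is proved, stated in full; the proofs are below) =====
def Claim_equal_equationsPossible : Prop := ∀ (equations : List String), Dom_equationsPossible equations → Pre_equationsPossible equations → Spec_equationsPossible equations (equationsPossible equations)

-- ===== LEMMAS AND PROOFS =====

-- the parent map as a total function (unseen variables are their own parent)
def pvPf (P : PySem.Dict Char Char) : Char → Char := fun z => P.getD z z
-- r is the root of x: some parent chain from x reaches the fixed point r
def pvIsRoot (f : Char → Char) (x r : Char) : Prop := ∃ n, f^[n] x = r ∧ f r = r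
-- every variable has a root (parent chains are acyclic)
def pvWF (f : Char → Char) : Prop := ∀ x, ∃ r, pvIsRoot f x r
-- u and v lie in the same class
def pvREq (f : Char → Char) (u v : Char) : Prop := ∃ r, pvIsRoot f u r ∧ pvIsRoot f v r
-- B's leader function
def pvLead (L : PySem.Dict Char Char) : Char → Char := fun z => L.getD z z
-- B's invariant: leaders are their own leaders, and every seen variable's leader is seen
def pvBInv (L : PySem.Dict Char Char) : Prop :=
  (∀ z, pvLead L (pvLead L z) = pvLead L z) ∧
  (∀ z, L.contains z = true → L.contains (pvLead L z) = true) ∧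
  L.keys.Nodup
-- the coupling invariant between A's union-find state and B's leader dict
def pvCouple (uf : pvUF) (L : PySem.Dict Char Char) : Prop :=
  pvWF (pvPf uf.parent) ∧ uf.parent.keys.Nodup ∧ pvBInv L ∧
  (∀ u v, pvREq (pvPf uf.parent) u v ↔ pvLead L u = pvLead L v)

theorem pvIsRoot_unique {f : Char → Char} {x r r' : Char}
    (h : pvIsRoot f x r) (h' : pvIsRoot f x r') : r = r' := by
  obtain ⟨n, hn, hr⟩ := h; obtain ⟨m, hm, hr'⟩ := h'
  rcases le_total n m with hle | hle
  · have h2 : f^[m] x = r := by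
      have h3 := Function.iterate_add_apply f (m - n) n x
      rw [Nat.sub_add_cancel hle] at h3
      rw [h3, hn, Function.iterate_fixed hr]
    exact h2.symm.trans hm
  · have h2 : f^[n] x = r' := by
      have h3 := Function.iterate_add_apply f (n - m) m x
      rw [Nat.sub_add_cancel hle] at h3
      rw [h3, hm, Function.iterate_fixed hr']
    exact hn.symm.trans h2

theorem pvIsRoot_of_fix {f : Char → Char} {x r : Char} (hx : f x = x) (h : pvIsRoot f x r) :
    r = x := pvIsRoot_unique h ⟨0, rfl, hx⟩

theorem pvIsRoot_fixed {f : Char → Char} {r : Char} (h : f r = r) : pvIsRoot f r r :=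
  ⟨0, rfl, h⟩

theorem pvIsRoot_step {f : Char → Char} {x r : Char} (h : pvIsRoot f (f x) r) :
    pvIsRoot f x r := by
  obtain ⟨n, hn, hr⟩ := h
  exact ⟨n + 1, by rw [Function.iterate_succ_apply]; exact hn, hr⟩

-- inserting a shortcut x ↦ r, where r is already x's root, does not change any root
theorem pvRoot_insert_point {f : Char → Char} {x r : Char} (hxr : pvIsRoot f x r) :
    ∀ z ρ, pvIsRoot (fun z => if z = x then r else f z) z ρ ↔ pvIsRoot f z ρ := by
  intro z ρ
  have hfr : f r = r := hxr.choose_spec.2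
  constructor
  · rintro ⟨m, hm, hρ⟩
    -- first: g ρ = ρ → f ρ = ρ
    have hfρ : f ρ = ρ := by
      by_cases hx : ρ = x
      · subst hx
        simp only [reduceIte] at hρ
        -- g x = r = x, so x is its own f-root? hρ : (if x = x then r else f x) = x means r = x
        have : r = ρ := hρ
        subst this
        exact hfr
      · simpa [hx] using hρ
    clear hρ
    induction m generalizing z with
    | zero =>
      rw [Function.iterate_zero_apply] at hm; subst hm
      exact ⟨0, rfl, hfρ⟩
    | succ m ih =>
      rw [Function.iterate_succ_apply] at hm
      by_cases hzx : z = x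
      · subst hzx
        simp only [reduceIte] at hm
        have hrρ : pvIsRoot f r ρ := ih r hm
        have : ρ = r := pvIsRoot_of_fix hfr hrρ
        subst this; exact hxr
      · simp only [if_neg hzx] at hm
        exact pvIsRoot_step (ih (f z) hm)
  · rintro ⟨m, hm, hρ⟩
    have hgρ : (fun z => if z = x then r else f z) ρ = ρ := by
      by_cases hx : ρ = x
      · subst hx
        simp only [reduceIte]
        exact (pvIsRoot_of_fix hρ hxr)
      · simp [hx, hρ]
    induction m generalizing z with
    | zero =>
      rw [Function.iterate_zero_apply] at hm; subst hm
      exact ⟨0, rfl, hgρ⟩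
    | succ m ih =>
      rw [Function.iterate_succ_apply] at hm
      by_cases hzx : z = x
      · subst hzx
        have hρr : ρ = r := pvIsRoot_unique ⟨m + 1, by rw [Function.iterate_succ_apply]; exact hm, hρ⟩ hxr
        subst hρr
        exact ⟨1, by simp, hgρ⟩
      · obtain ⟨k, hk, hgρ'⟩ := ih (f z) hm
        exact ⟨k + 1, by rw [Function.iterate_succ_apply]; simpa [hzx] using hk, hgρ'⟩

-- linking root py under root px: the new root is px for the old py-class, unchanged otherwise
theorem pvRoot_link {f : Char → Char} {px py : Char}
    (hpx : f px = px) (hpy : f py = py) (hne : px ≠ py) :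
    ∀ z ρ, pvIsRoot (fun z => if z = py then px else f z) z ρ ↔
      ((pvIsRoot f z py ∧ ρ = px) ∨ (pvIsRoot f z ρ ∧ ρ ≠ py)) := by
  intro z ρ
  have hgpx : (fun z => if z = py then px else f z) px = px := by
    simp [if_neg hne, hpx]
  constructor
  · rintro ⟨m, hm, hρ⟩
    -- g ρ = ρ forces ρ ≠ py and f ρ = ρ
    have hρpy : ρ ≠ py := by
      intro h; subst h
      simp only [if_pos rfl] at hρ
      exact hne hρ
    have hfρ : f ρ = ρ := by simpa [hρpy] using hρ
    clear hρ
    induction m generalizing z with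
    | zero =>
      rw [Function.iterate_zero_apply] at hm; subst hm
      exact Or.inr ⟨⟨0, rfl, hfρ⟩, hρpy⟩
    | succ m ih =>
      rw [Function.iterate_succ_apply] at hm
      by_cases hzpy : z = py
      · subst hzpy
        simp only [if_pos rfl] at hm
        rcases ih px hm with ⟨hpxpy, -⟩ | ⟨hpxρ, -⟩
        · exact absurd (pvIsRoot_of_fix hpx hpxpy).symm hne
        · have : ρ = px := pvIsRoot_of_fix hpx hpxρ
          exact Or.inl ⟨⟨0, rfl, hpy⟩, this⟩
      · simp only [if_neg hzpy] at hm
        rcases ih (f z) hm with ⟨h1, h2⟩ | ⟨h1, h2⟩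
        · exact Or.inl ⟨pvIsRoot_step h1, h2⟩
        · exact Or.inr ⟨pvIsRoot_step h1, h2⟩
  · rintro (⟨⟨m, hm, -⟩, hρ⟩ | ⟨⟨m, hm, hρ⟩, hρpy⟩)
    · subst hρ
      -- chain z →* py → px, px fixed under g
      induction m generalizing z with
      | zero =>
        rw [Function.iterate_zero_apply] at hm; subst hm
        exact ⟨1, by simp, hgpx⟩
      | succ m ih =>
        rw [Function.iterate_succ_apply] at hm
        by_cases hzpy : z = py
        · subst hzpy; exact ⟨1, by simp, hgpx⟩
        · obtain ⟨k, hk, -⟩ := ih (f z) hm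
          exact ⟨k + 1, by rw [Function.iterate_succ_apply]; simpa [hzpy] using hk, hgpx⟩
    · have hgρ : (fun z => if z = py then px else f z) ρ = ρ := by simp [hρpy, hρ]
      induction m generalizing z with
      | zero =>
        rw [Function.iterate_zero_apply] at hm; subst hm
        exact ⟨0, rfl, hgρ⟩
      | succ m ih =>
        rw [Function.iterate_succ_apply] at hm
        by_cases hzpy : z = py
        · -- f py = py so the chain stays at py, forcing ρ = py, contradiction
          have : ρ = py := by
            rw [hzpy, hpy, Function.iterate_fixed hpy m] at hm
            exact hm.symm
          exact absurd this hρpy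
        · obtain ⟨k, hk, -⟩ := ih (f z) hm
          exact ⟨k + 1, by rw [Function.iterate_succ_apply]; simpa [hzpy] using hk, hgρ⟩

-- a chain to the root needs at most |keys| steps (non-fixed points are keys, and
-- the nodes of a minimal chain are pairwise distinct)
theorem pvChain_bound (P : PySem.Dict Char Char) (hWF : pvWF (pvPf P)) (hnd : P.keys.Nodup) (x : Char) :
    ∃ n r, n ≤ P.keys.length ∧ (pvPf P)^[n] x = r ∧ pvPf P r = r := by
  classical
  obtain ⟨r, m, hm, hr⟩ := hWF x
  set f := pvPf P with hf
  have hQex : ∃ k, f (f^[k] x) = f^[k] x := ⟨m, by rw [hm, hr]⟩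
  set n := Nat.find hQex with hn
  have hQn : f (f^[n] x) = f^[n] x := Nat.find_spec hQex
  refine ⟨n, f^[n] x, ?_, rfl, hQn⟩
  -- the chain nodes before the root are pairwise distinct and all are keys
  have hinj : ∀ i < n, ∀ j < n, f^[i] x = f^[j] x → i = j := by
    intro i hi j hj hij
    by_contra hne
    -- wlog i < j
    rcases Nat.lt_or_ge i j with hlt | hge
    · have hkey : f^[i + (n - j)] x = f^[n] x := by
        have h1 : f^[n] x = f^[n - j] (f^[j] x) := by
          rw [← Function.iterate_add_apply]
          congr 1
          omega
        have h2 : f^[i + (n - j)] x = f^[n - j] (f^[i] x) := by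
          rw [← Function.iterate_add_apply]
          congr 1
          omega
        rw [h1, ← hij, ← h2]
      have : f (f^[i + (n - j)] x) = f^[i + (n - j)] x := by rw [hkey]; exact hQn
      exact absurd this (Nat.find_min hQex (by omega))
    · have hlt : j < i := by omega
      have hkey : f^[j + (n - i)] x = f^[n] x := by
        have h1 : f^[n] x = f^[n - i] (f^[i] x) := by
          rw [← Function.iterate_add_apply]
          congr 1
          omega
        have h2 : f^[j + (n - i)] x = f^[n - i] (f^[j] x) := by
          rw [← Function.iterate_add_apply]
          congr 1
          omega
        rw [h1, hij, ← h2]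
      have : f (f^[j + (n - i)] x) = f^[j + (n - i)] x := by rw [hkey]; exact hQn
      exact absurd this (Nat.find_min hQex (by omega))
  have hmemkeys : ∀ i < n, f^[i] x ∈ P.keys := by
    intro i hi
    have hnf : f (f^[i] x) ≠ f^[i] x := Nat.find_min hQex hi
    have hc : P.contains (f^[i] x) = true := by
      by_contra hcc
      exact hnf (by
        show P.getD (f^[i] x) (f^[i] x) = f^[i] x
        exact PySem.Dict.getD_of_not_contains P _ (by simpa using hcc))
    exact (PySem.Dict.contains_iff_mem_keys P _).mp hc
  -- n distinct keys force n ≤ |keys|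
  have hl : ((List.range n).map (fun i => f^[i] x)).Nodup := by
    refine List.Nodup.map_on ?_ (List.nodup_range)
    intro i hi j hj hij
    exact hinj i (List.mem_range.mp hi) j (List.mem_range.mp hj) hij
  have hsub : ((List.range n).map (fun i => f^[i] x)) ⊆ P.keys := by
    intro a ha
    obtain ⟨i, hi, rfl⟩ := List.mem_map.mp ha
    exact hmemkeys i (List.mem_range.mp hi)
  calc n = ((List.range n).map (fun i => f^[i] x)).length := by simp
    _ = ((List.range n).map (fun i => f^[i] x)).toFinset.card := (List.toFinset_card_of_nodup hl).symm
    _ ≤ P.keys.toFinset.card := Finset.card_le_card (by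
        intro a ha
        simp only [List.mem_toFinset] at *
        exact hsub ha)
    _ ≤ P.keys.length := P.keys.toFinset_card_le

theorem pvPf_setdefault (P : PySem.Dict Char Char) (x : Char) :
    pvPf (P.setdefault x x) = pvPf P := by
  funext z
  by_cases hc : P.contains x
  · rw [PySem.Dict.setdefault_of_contains P x hc]
  · rw [PySem.Dict.setdefault_of_not_contains P x (by simpa using hc)]
    show (P.insert x x).getD z z = P.getD z z
    rw [PySem.Dict.getD_insert P x z x z]
    split_ifs with h
    · subst h
      rw [PySem.Dict.getD_of_not_contains P z (by simpa using hc)]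
    · rfl

theorem pvPf_insert (P : PySem.Dict Char Char) (k v : Char) :
    pvPf (P.insert k v) = fun z => if z = k then v else pvPf P z := by
  funext z
  show (P.insert k v).getD z z = _
  rw [PySem.Dict.getD_insert P k z v z]
  rfl

-- find returns the root of x and preserves all roots, key-nodupness
theorem pvFind_spec : ∀ (fuel n : Nat) (x r : Char) (P : PySem.Dict Char Char) (S : PySem.Dict Char Int),
    (pvPf P)^[n] x = r → pvPf P r = r → n < fuel → P.keys.Nodup →
    ∃ P' S', pvFind fuel ⟨P, S⟩ x = (⟨P', S'⟩, r) ∧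
      (∀ z ρ, pvIsRoot (pvPf P') z ρ ↔ pvIsRoot (pvPf P) z ρ) ∧
      P'.keys.Nodup := by
  intro fuel
  induction fuel with
  | zero => intro n x r P S hn hr hfuel hnd; omega
  | succ fuel ih =>
    intro n x r P S hn hr hfuel hnd
    have hP1 := pvPf_setdefault P x
    have hcond : (P.setdefault x x).getD x x = pvPf P x := congrFun hP1 x
    have hnd1 : (P.setdefault x x).keys.Nodup := by
      rw [PySem.Dict.keys_setdefault]
      split_ifs with hc
      · exact hnd
      · have hxk : x ∉ P.keys := fun hm =>
          (by simpa using hc : ¬ P.contains x = true) ((PySem.Dict.contains_iff_mem_keys P x).mpr hm)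
        simp [List.nodup_append, hnd]
        exact fun a ha hax => hxk (hax ▸ ha)
    by_cases hx : pvPf P x = x
    · have hr' : x = r := (Function.iterate_fixed hx n).symm.trans hn
      subst hr'
      refine ⟨P.setdefault x x, S.setdefault x 1, ?_, ?_, hnd1⟩
      · simp only [pvFind, hcond]
        simp [hx]
      · intro z ρ
        rw [hP1]
    · -- x is not its own parent: recurse on its parent, then compress
      have hn1 : 1 ≤ n := by
        rcases Nat.eq_zero_or_pos n with h0 | h; swap; · omega
        subst h0
        rw [Function.iterate_zero_apply] at hn
        subst hn
        exact absurd hr hx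
      have hchain : (pvPf (P.setdefault x x))^[n - 1] (pvPf P x) = r := by
        rw [hP1]
        have hn' : (pvPf P)^[(n - 1) + 1] x = r := by
          rw [show n - 1 + 1 = n by omega]
          exact hn
        rw [Function.iterate_succ_apply] at hn'
        exact hn'
      have hr1 : pvPf (P.setdefault x x) r = r := by rw [hP1]; exact hr
      obtain ⟨P2, S2, heq, hroots2, hnd2⟩ :=
        ih (n - 1) (pvPf P x) r (P.setdefault x x) (S.setdefault x 1) hchain hr1 (by omega) hnd1
      refine ⟨P2.insert x r, S2, ?_, ?_, PySem.Dict.nodup_keys_insert P2 x r hnd2⟩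
      · simp only [pvFind, hcond, heq]
        simp [hx]
      · intro z ρ
        have hxr2 : pvIsRoot (pvPf P2) x r := by
          rw [hroots2 x r, hP1]
          exact ⟨n, hn, hr⟩
        rw [pvPf_insert P2 x r]
        rw [pvRoot_insert_point hxr2 z ρ, hroots2 z ρ, hP1]


theorem pvREq_symm {f : Char → Char} {u v : Char} (h : pvREq f u v) : pvREq f v u := by
  obtain ⟨r, h1, h2⟩ := h
  exact ⟨r, h2, h1⟩

theorem pvREq_trans {f : Char → Char} {u v w : Char} (h1 : pvREq f u v) (h2 : pvREq f v w) :
    pvREq f u w := by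
  obtain ⟨r, ha, hb⟩ := h1
  obtain ⟨r', hb', hc⟩ := h2
  have := pvIsRoot_unique hb hb'
  subst this
  exact ⟨r, ha, hc⟩

theorem pvREq_root {f : Char → Char} {u w : Char} (hw : f w = w) (h : pvREq f u w) :
    pvIsRoot f u w := by
  obtain ⟨r, hu, hwr⟩ := h
  have : r = w := pvIsRoot_of_fix hw hwr
  subst this
  exact hu

theorem pvREq_congr_right {f : Char → Char} {x rx : Char} (hx : pvIsRoot f x rx) (u : Char) :
    pvREq f u x ↔ pvREq f u rx := by
  have hfrx : f rx = rx := hx.choose_spec.2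
  constructor
  · rintro ⟨r, hu, hxr⟩
    have h2 : r = rx := pvIsRoot_unique hxr hx
    rw [h2] at hu
    exact ⟨rx, hu, pvIsRoot_fixed hfrx⟩
  · rintro ⟨r, hu, hrxr⟩
    have h2 : r = rx := pvIsRoot_of_fix hfrx hrxr
    rw [h2] at hu
    exact ⟨rx, hu, hx⟩

-- linking two distinct roots merges exactly the two classes
theorem pvLink_REq {f : Char → Char} {px py : Char}
    (hpx : f px = px) (hpy : f py = py) (hne : px ≠ py) :
    ∀ u v, pvREq (fun z => if z = py then px else f z) u v ↔
      (pvREq f u v ∨ (pvREq f u px ∧ pvREq f v py) ∨ (pvREq f u py ∧ pvREq f v px)) := by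
  intro u v
  constructor
  · rintro ⟨ρ, hu, hv⟩
    rw [pvRoot_link hpx hpy hne] at hu hv
    rcases hu with ⟨hu, hρ⟩ | ⟨hu, hρ⟩ <;> rcases hv with ⟨hv, hv2⟩ | ⟨hv, hv2⟩
    · exact Or.inl ⟨py, hu, hv⟩
    · rw [hρ] at hv
      exact Or.inr (Or.inr ⟨⟨py, hu, pvIsRoot_fixed hpy⟩, ⟨px, hv, pvIsRoot_fixed hpx⟩⟩)
    · rw [hv2] at hu
      exact Or.inr (Or.inl ⟨⟨px, hu, pvIsRoot_fixed hpx⟩, ⟨py, hv, pvIsRoot_fixed hpy⟩⟩)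
    · exact Or.inl ⟨ρ, hu, hv⟩
  · rintro (⟨r, hu, hv⟩ | ⟨hux, hvy⟩ | ⟨huy, hvx⟩)
    · by_cases hrpy : r = py
      · subst hrpy
        exact ⟨px, (pvRoot_link hpx hpy hne u px).mpr (Or.inl ⟨hu, rfl⟩),
               (pvRoot_link hpx hpy hne v px).mpr (Or.inl ⟨hv, rfl⟩)⟩
      · exact ⟨r, (pvRoot_link hpx hpy hne u r).mpr (Or.inr ⟨hu, hrpy⟩),
               (pvRoot_link hpx hpy hne v r).mpr (Or.inr ⟨hv, hrpy⟩)⟩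
    · exact ⟨px, (pvRoot_link hpx hpy hne u px).mpr (Or.inr ⟨pvREq_root hpx hux, hne⟩),
             (pvRoot_link hpx hpy hne v px).mpr (Or.inl ⟨pvREq_root hpy hvy, rfl⟩)⟩
    · exact ⟨px, (pvRoot_link hpx hpy hne u px).mpr (Or.inl ⟨pvREq_root hpy huy, rfl⟩),
             (pvRoot_link hpx hpy hne v px).mpr (Or.inr ⟨pvREq_root hpx hvx, hne⟩)⟩

theorem pvLink_WF {f : Char → Char} {px py : Char}
    (hpx : f px = px) (hpy : f py = py) (hne : px ≠ py) (hWF : pvWF f) :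
    pvWF (fun z => if z = py then px else f z) := by
  intro z
  obtain ⟨r, hz⟩ := hWF z
  by_cases hrpy : r = py
  · subst hrpy
    exact ⟨px, (pvRoot_link hpx hpy hne z px).mpr (Or.inl ⟨hz, rfl⟩)⟩
  · exact ⟨r, (pvRoot_link hpx hpy hne z r).mpr (Or.inr ⟨hz, hrpy⟩)⟩

-- union realises the merge of the two classes, at the level of the root-equality relation
theorem pvUnion_spec (uf : pvUF) (x y : Char)
    (hWF : pvWF (pvPf uf.parent)) (hnd : uf.parent.keys.Nodup) :
    pvWF (pvPf (pvUnion uf x y).parent) ∧ (pvUnion uf x y).parent.keys.Nodup ∧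
    (∀ u v, pvREq (pvPf (pvUnion uf x y).parent) u v ↔
      (pvREq (pvPf uf.parent) u v ∨
       (pvREq (pvPf uf.parent) u x ∧ pvREq (pvPf uf.parent) v y) ∨
       (pvREq (pvPf uf.parent) u y ∧ pvREq (pvPf uf.parent) v x))) := by
  obtain ⟨n1, rx, hb1, hc1, hr1⟩ := pvChain_bound uf.parent hWF hnd x
  obtain ⟨P2, S2, heq1, hroots2, hnd2⟩ :=
    pvFind_spec (pvFuel uf) n1 x rx uf.parent uf.size hc1 hr1 (by
      unfold pvFuel; omega) hnd
  have hIx : pvIsRoot (pvPf uf.parent) x rx := ⟨n1, hc1, hr1⟩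
  have hWF2 : pvWF (pvPf P2) := fun z => (hWF z).imp (fun r h => (hroots2 z r).mpr h)
  obtain ⟨n2, ry, hb2, hc2, hr2⟩ := pvChain_bound P2 hWF2 hnd2 y
  obtain ⟨P3, S3, heq2, hroots3, hnd3⟩ :=
    pvFind_spec (pvFuel ⟨P2, S2⟩) n2 y ry P2 S2 hc2 hr2 (by unfold pvFuel; simp; omega) hnd2
  have hIy : pvIsRoot (pvPf uf.parent) y ry := (hroots2 y ry).mp ⟨n2, hc2, hr2⟩
  have hWF3 : pvWF (pvPf P3) := fun z => (hWF2 z).imp (fun r h => (hroots3 z r).mpr h)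
  have hroots31 : ∀ z ρ, pvIsRoot (pvPf P3) z ρ ↔ pvIsRoot (pvPf uf.parent) z ρ :=
    fun z ρ => (hroots3 z ρ).trans (hroots2 z ρ)
  have hREq3 : ∀ u v, pvREq (pvPf P3) u v ↔ pvREq (pvPf uf.parent) u v := fun u v =>
    exists_congr fun r => and_congr (hroots31 u r) (hroots31 v r)
  have e1 : pvFind (pvFuel uf) uf x = (⟨P2, S2⟩, rx) := heq1
  have e2 : pvFind (pvFuel (⟨P2, S2⟩ : pvUF)) ⟨P2, S2⟩ y = (⟨P3, S3⟩, ry) := heq2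
  have hfrx : pvPf P3 rx = rx := ((hroots31 rx rx).mpr ⟨0, rfl, hr1⟩).choose_spec.2
  have hfry : pvPf P3 ry = ry := ((hroots31 ry ry).mpr
    ((hroots2 ry ry).mp ⟨0, rfl, hr2⟩)).choose_spec.2
  -- the merge formula, for either orientation of the link
  have main : ∀ pr ch : Char, ((pr = rx ∧ ch = ry) ∨ (pr = ry ∧ ch = rx)) → rx ≠ ry →
      pvWF (pvPf (P3.insert ch pr)) ∧ (P3.insert ch pr).keys.Nodup ∧
      (∀ u v, pvREq (pvPf (P3.insert ch pr)) u v ↔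
        (pvREq (pvPf uf.parent) u v ∨
         (pvREq (pvPf uf.parent) u x ∧ pvREq (pvPf uf.parent) v y) ∨
         (pvREq (pvPf uf.parent) u y ∧ pvREq (pvPf uf.parent) v x))) := by
    intro pr ch hor hne
    have hpr : pvPf P3 pr = pr := by rcases hor with ⟨h1, h2⟩ | ⟨h1, h2⟩ <;> subst h1 <;>
      first | exact hfrx | exact hfry
    have hch : pvPf P3 ch = ch := by rcases hor with ⟨h1, h2⟩ | ⟨h1, h2⟩ <;> subst h2 <;>
      first | exact hfrx | exact hfry
    have hprch : pr ≠ ch := by rcases hor with ⟨h1, h2⟩ | ⟨h1, h2⟩ <;> subst h1 <;> subst h2 <;>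
      first | exact hne | exact hne.symm
    rw [pvPf_insert P3 ch pr]
    refine ⟨pvLink_WF hpr hch hprch hWF3, PySem.Dict.nodup_keys_insert P3 ch pr hnd3, ?_⟩
    intro u v
    rw [pvLink_REq hpr hch hprch u v]
    have hx3 : pvIsRoot (pvPf P3) x rx := (hroots31 x rx).mpr hIx
    have hy3 : pvIsRoot (pvPf P3) y ry := (hroots31 y ry).mpr hIy
    have cx : ∀ w, pvREq (pvPf P3) w rx ↔ pvREq (pvPf uf.parent) w x := fun w =>
      ((pvREq_congr_right hx3 w).symm).trans (hREq3 w x)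
    have cy : ∀ w, pvREq (pvPf P3) w ry ↔ pvREq (pvPf uf.parent) w y := fun w =>
      ((pvREq_congr_right hy3 w).symm).trans (hREq3 w y)
    rcases hor with ⟨h1, h2⟩ | ⟨h1, h2⟩ <;> subst h1 <;> subst h2
    · rw [hREq3 u v, cx u, cy v, cy u, cx v]
    · rw [hREq3 u v, cy u, cx v, cx u, cy v]
      tauto
  by_cases hne : rx = ry
  · -- roots already equal: state unchanged, and the merge collapses
    have hred : pvUnion uf x y = ⟨P3, S3⟩ := by
      simp only [pvUnion, e1, e2]
      simp [hne]
    rw [hred]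
    refine ⟨hWF3, hnd3, ?_⟩
    subst hne
    intro u v
    rw [hREq3 u v]
    have hxy : pvREq (pvPf uf.parent) x y := ⟨rx, hIx, hIy⟩
    constructor
    · exact Or.inl
    · rintro (h | ⟨h1, h2⟩ | ⟨h1, h2⟩)
      · exact h
      · exact pvREq_trans (pvREq_trans h1 hxy) (pvREq_symm h2)
      · exact pvREq_trans (pvREq_trans h1 (pvREq_symm hxy)) (pvREq_symm h2)
  · by_cases hsz : S3.getD rx 1 < S3.getD ry 1
    · have hred : pvUnion uf x y = ⟨P3.insert rx ry, S3.insert ry (S3.getD ry 1 + S3.getD rx 1)⟩ := by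
        simp only [pvUnion, e1, e2]
        simp [hne, hsz]
      rw [hred]
      exact main ry rx (Or.inr ⟨rfl, rfl⟩) hne
    · have hred : pvUnion uf x y = ⟨P3.insert ry rx, S3.insert rx (S3.getD rx 1 + S3.getD ry 1)⟩ := by
        simp only [pvUnion, e1, e2]
        simp [hne, hsz]
      rw [hred]
      exact main rx ry (Or.inl ⟨rfl, rfl⟩) hne

-- the relabelling fold, pointwise
theorem pvRelabel_get? (lx ly : Char) : ∀ (its : List (Char × Char)) (d : PySem.Dict Char Char) (z : Char),
    (its.foldl (fun d kv => if kv.2 = ly then d.insert kv.1 lx else d) d).get? z =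
      if its.any (fun p => p.1 == z && p.2 == ly) then some lx else d.get? z := by
  intro its
  induction its with
  | nil => intro d z; simp
  | cons p its ih =>
    intro d z
    rw [List.foldl_cons, List.any_cons]
    by_cases hp : p.2 = ly
    · rw [if_pos hp]
      rw [ih]
      by_cases hz : p.1 = z
      · have hb : (p.1 == z && p.2 == ly) = true := by simp [hz, hp]
        rw [hb]
        simp only [Bool.true_or, if_pos rfl]
        split_ifs with h
        · rfl
        · rw [hz, PySem.Dict.get?_insert_self]
      · have hb : (p.1 == z && p.2 == ly) = false := by simp [hz]
        rw [hb, Bool.false_or, PySem.Dict.get?_insert_of_ne d lx (fun h => hz h.symm)]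
    · rw [if_neg hp]
      have hb : (p.1 == z && p.2 == ly) = false := by simp [hp]
      rw [ih, hb, Bool.false_or]

theorem pvRelabel_nodup (lx ly : Char) : ∀ (its : List (Char × Char)) (d : PySem.Dict Char Char),
    d.keys.Nodup → (its.foldl (fun d kv => if kv.2 = ly then d.insert kv.1 lx else d) d).keys.Nodup := by
  intro its
  induction its with
  | nil => intro d h; exact h
  | cons p its ih =>
    intro d h
    rw [List.foldl_cons]
    split_ifs with hp
    · exact ih _ (PySem.Dict.nodup_keys_insert d p.1 lx h)
    · exact ih _ h

-- the any-condition of pvRelabel_get? in terms of lookups (needs nodup keys)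
theorem pvAny_iff (L : PySem.Dict Char Char) (hnd : L.keys.Nodup) (z ly : Char) :
    (L.items.any (fun p => p.1 == z && p.2 == ly) = true) ↔
      (L.contains z = true ∧ pvLead L z = ly) := by
  constructor
  · intro h
    obtain ⟨p, hp, hcond⟩ := List.any_eq_true.mp h
    rw [Bool.and_eq_true, beq_iff_eq, beq_iff_eq] at hcond
    obtain ⟨h1, h2⟩ := hcond
    have hmem : (z, ly) ∈ L.items := by
      have : p = (z, ly) := Prod.ext h1 h2
      rwa [this] at hp
    refine ⟨(PySem.Dict.contains_iff_mem_keys L z).mpr ?_, ?_⟩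
    · exact PySem.Dict.mem_keys_of_mem_items L hmem
    · show L.getD z z = ly
      exact PySem.Dict.getD_of_mem_items L hmem hnd z
  · rintro ⟨hc, hl⟩
    have hne : L.get? z ≠ none := by
      intro h0
      rw [PySem.Dict.get?_eq_none_iff_contains] at h0
      rw [hc] at h0
      simp at h0
    obtain ⟨v, hv⟩ := Option.ne_none_iff_exists'.mp hne
    have hvly : v = ly := by
      rw [← hl]
      show _ = L.getD z z
      unfold PySem.Dict.getD
      rw [hv]
      rfl
    subst hvly
    -- extract the found pair
    unfold PySem.Dict.get? at hv
    obtain ⟨pr, hfind⟩ : ∃ pr, L.items.find? (fun p => p.1 == z) = some pr := by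
      cases hf : L.items.find? (fun p => p.1 == z) with
      | none => rw [hf] at hv; simp at hv
      | some pr => exact ⟨pr, rfl⟩
    rw [hfind] at hv
    simp only [Option.map_some] at hv
    have hprmem : pr ∈ L.items := List.mem_of_find?_eq_some hfind
    have hpr1 := List.find?_some hfind
    refine List.any_eq_true.mpr ⟨pr, hprmem, ?_⟩
    rw [Bool.and_eq_true, hpr1]
    exact ⟨rfl, by rw [beq_iff_eq]; exact Option.some.inj hv⟩

theorem pvRelabel_lead (L : PySem.Dict Char Char) (hnd : L.keys.Nodup) (lx ly z : Char) :
    pvLead (pvRelabel L lx ly) z =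
      if L.contains z = true ∧ pvLead L z = ly then lx else pvLead L z := by
  show (pvRelabel L lx ly).getD z z = _
  unfold PySem.Dict.getD
  unfold pvRelabel
  rw [pvRelabel_get? lx ly L.items L z]
  by_cases h : L.items.any (fun p => p.1 == z && p.2 == ly) = true
  · rw [if_pos h, if_pos ((pvAny_iff L hnd z ly).mp h)]
    rfl
  · rw [if_neg h, if_neg (fun hc => h ((pvAny_iff L hnd z ly).mpr hc))]
    rfl

theorem pvRelabel_contains (L : PySem.Dict Char Char) (lx ly z : Char) :
    (pvRelabel L lx ly).contains z = L.contains z := by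
  rcases hc : L.contains z with _ | _
  · -- not contained: get? stays none
    rw [← PySem.Dict.get?_eq_none_iff_contains] at hc ⊢
    unfold pvRelabel
    rw [pvRelabel_get? lx ly L.items L z]
    split_ifs with h
    · -- a matching item would mean z is a key
      exfalso
      obtain ⟨p, hp, hcond⟩ := List.any_eq_true.mp h
      rw [Bool.and_eq_true, beq_iff_eq, beq_iff_eq] at hcond
      have : L.get? z ≠ none := by
        intro h0
        rw [PySem.Dict.get?_eq_none_iff_contains] at h0
        have hk : z ∈ L.keys := by
          have := PySem.Dict.mem_keys_of_mem_items L hp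
          rwa [hcond.1] at this
        simp [((PySem.Dict.contains_iff_mem_keys L z).mpr hk)] at h0
      exact this hc
    · exact hc
  · have : (pvRelabel L lx ly).get? z ≠ none := by
      unfold pvRelabel
      rw [pvRelabel_get? lx ly L.items L z]
      split_ifs with h
      · simp
      · intro h0
        rw [PySem.Dict.get?_eq_none_iff_contains] at h0
        rw [hc] at h0
        simp at h0
    rcases hc2 : (pvRelabel L lx ly).contains z with _ | _
    · exfalso
      rw [← PySem.Dict.get?_eq_none_iff_contains] at hc2
      exact this hc2
    · rfl

-- B's union realises the same merge on leader-equality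
theorem pvBUnion_lead (L : PySem.Dict Char Char) (x y : Char) (hB : pvBInv L) :
    (∀ z, pvLead (pvBUnion L x y) z =
      if pvLead L z = pvLead L y then pvLead L x else pvLead L z) ∧
    pvBInv (pvBUnion L x y) := by
  obtain ⟨hid, hvk, hnd⟩ := hB
  by_cases hxy : pvLead L x = pvLead L y
  · rw [show pvBUnion L x y = L by unfold pvBUnion; exact if_neg (by simpa using hxy)]
    refine ⟨?_, hid, hvk, hnd⟩
    intro z
    split_ifs with h
    · exact h.trans hxy.symm
    · rfl
  · have hred : pvBUnion L x y =
        ((pvRelabel L (pvLead L x) (pvLead L y)).insert x (pvLead L x)).insert y (pvLead L x) := by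
      unfold pvBUnion
      exact if_pos (by simpa using hxy)
    -- if the unseen-variable case z = pvLead L y arises, then pvLead L y = y
    have hlyy : L.contains (pvLead L y) = true ∨ pvLead L y = y := by
      rcases h0 : L.contains y with _ | _
      · exact Or.inr (PySem.Dict.getD_of_not_contains L y h0)
      · exact Or.inl (hvk y h0)
    -- the pointwise leader formula
    have hlead : ∀ z, pvLead (pvBUnion L x y) z =
        if pvLead L z = pvLead L y then pvLead L x else pvLead L z := by
      intro z
      rw [hred]
      show ((((pvRelabel L (pvLead L x) (pvLead L y)).insert x (pvLead L x)).insert y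
        (pvLead L x)).getD z z) = _
      rw [PySem.Dict.getD_insert, PySem.Dict.getD_insert]
      by_cases hzy : z = y
      · rw [if_pos hzy, if_pos (by rw [hzy])]
      · rw [if_neg hzy]
        by_cases hzx : z = x
        · rw [if_pos hzx, hzx, if_neg hxy]
        · rw [if_neg hzx]
          have : (pvRelabel L (pvLead L x) (pvLead L y)).getD z z =
              pvLead (pvRelabel L (pvLead L x) (pvLead L y)) z := rfl
          rw [this, pvRelabel_lead L hnd (pvLead L x) (pvLead L y) z]
          by_cases hc : L.contains z = true
          · simp [hc]
          · have hlz : pvLead L z = z :=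
              PySem.Dict.getD_of_not_contains L z (by
                rcases h0 : L.contains z with _ | _
                · rfl
                · exact absurd h0 hc)
            rw [if_neg (by simp [hc]), if_neg ?_]
            intro hzly
            rw [hlz] at hzly
            rcases hlyy with h1 | h1
            · rw [← hzly] at h1
              exact hc h1
            · exact hzy (hzly.trans h1)
    refine ⟨hlead, ?_, ?_, ?_⟩
    · -- idempotence
      intro z
      rw [hlead z, hlead _]
      by_cases h1 : pvLead L z = pvLead L y
      · rw [if_pos h1]
        have h2 : pvLead L (pvLead L x) = pvLead L x := hid x
        rw [h2, if_neg hxy]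
      · rw [if_neg h1, hid z, if_neg h1]
    · -- every leader of a seen variable is seen
      intro z hcz
      have hcontains : ∀ w, (pvBUnion L x y).contains w = (w == y || (w == x || L.contains w)) := by
        intro w
        rw [hred, PySem.Dict.contains_insert, PySem.Dict.contains_insert, pvRelabel_contains]
      rw [hcontains, hlead z]
      by_cases h1 : pvLead L z = pvLead L y
      · rw [if_pos h1]
        rcases h0 : L.contains x with _ | _
        · have h2 : pvLead L x = x := PySem.Dict.getD_of_not_contains L x h0
          simp [h2]
        · have h2 := hvk x h0
          simp [h2]
      · rw [if_neg h1]
        rw [hcontains z] at hcz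
        rcases Bool.or_eq_true_iff.mp hcz with h | h
        · rw [beq_iff_eq] at h
          rw [h] at h1
          exact absurd rfl h1
        · rcases Bool.or_eq_true_iff.mp h with h | h
          · rw [beq_iff_eq] at h
            rw [h]
            rcases h0 : L.contains x with _ | _
            · have h2 : pvLead L x = x := PySem.Dict.getD_of_not_contains L x h0
              simp [h2]
            · simp [hvk x h0]
          · have h2 := hvk z h
            simp [h2]
    · -- nodup keys
      rw [hred]
      exact PySem.Dict.nodup_keys_insert _ y (pvLead L x)
        (PySem.Dict.nodup_keys_insert _ x (pvLead L x)
          (pvRelabel_nodup (pvLead L x) (pvLead L y) L.items L hnd))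

theorem pvIteMerge (a b X Y : Char) :
    (a = b ∨ (a = X ∧ b = Y) ∨ (a = Y ∧ b = X)) ↔
      ((if a = Y then X else a) = (if b = Y then X else b)) := by
  by_cases haY : a = Y <;> by_cases hbY : b = Y <;> simp [haY, hbY] <;>
    constructor <;> intro h <;> tauto

theorem pvCouple_step (uf : pvUF) (L : PySem.Dict Char Char) (x y : Char)
    (h : pvCouple uf L) : pvCouple (pvUnion uf x y) (pvBUnion L x y) := by
  obtain ⟨hWF, hnd, hB, hrel⟩ := h
  obtain ⟨hWF', hnd', hmerge⟩ := pvUnion_spec uf x y hWF hnd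
  obtain ⟨hlead, hB'⟩ := pvBUnion_lead L x y hB
  refine ⟨hWF', hnd', hB', ?_⟩
  intro u v
  rw [hmerge u v, hrel u v, hrel u x, hrel v y, hrel u y, hrel v x, hlead u, hlead v]
  exact pvIteMerge (pvLead L u) (pvLead L v) (pvLead L x) (pvLead L y)

theorem pvCouple_fold (eqs : List String) : ∀ (uf : pvUF) (L : PySem.Dict Char Char),
    pvCouple uf L →
    pvCouple
      (eqs.foldl (fun uf eq => if pvC1 eq = '=' then pvUnion uf (pvC0 eq) (pvCL eq) else uf) uf)
      (eqs.foldl (fun L eq => if pvC1 eq = '=' then pvBUnion L (pvC0 eq) (pvCL eq) else L) L) := by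
  induction eqs with
  | nil => intro uf L h; exact h
  | cons eq rest ih =>
    intro uf L h
    rw [List.foldl_cons, List.foldl_cons]
    by_cases hq : pvC1 eq = '='
    · rw [if_pos hq, if_pos hq]
      exact ih _ _ (pvCouple_step uf L (pvC0 eq) (pvCL eq) h)
    · rw [if_neg hq, if_neg hq]
      exact ih _ _ h

theorem pvCheck_eq (eqs : List String) : ∀ (uf : pvUF) (L : PySem.Dict Char Char),
    pvCouple uf L →
    pvCheck uf eqs = eqs.all (fun eq =>
      !(pvC1 eq == '!' && L.getD (pvC0 eq) (pvC0 eq) == L.getD (pvCL eq) (pvCL eq))) := by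
  induction eqs with
  | nil => intro uf L _; rfl
  | cons eq rest ih =>
    intro uf L h
    obtain ⟨hWF, hnd, hB, hrel⟩ := h
    rw [List.all_cons]
    by_cases hq : pvC1 eq = '!'
    · obtain ⟨n1, r1, hb1, hc1, hr1⟩ := pvChain_bound uf.parent hWF hnd (pvC0 eq)
      obtain ⟨P2, S2, heq1, hroots2, hnd2⟩ :=
        pvFind_spec (pvFuel uf) n1 (pvC0 eq) r1 uf.parent uf.size hc1 hr1 (by
          unfold pvFuel; omega) hnd
      have hWF2 : pvWF (pvPf P2) := fun z => (hWF z).imp (fun r hh => (hroots2 z r).mpr hh)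
      obtain ⟨n2, r2, hb2, hc2, hr2⟩ := pvChain_bound P2 hWF2 hnd2 (pvCL eq)
      obtain ⟨P3, S3, heq2, hroots3, hnd3⟩ :=
        pvFind_spec (pvFuel ⟨P2, S2⟩) n2 (pvCL eq) r2 P2 S2 hc2 hr2 (by
          unfold pvFuel; simp; omega) hnd2
      have e1 : pvFind (pvFuel uf) uf (pvC0 eq) = (⟨P2, S2⟩, r1) := heq1
      have e2 : pvFind (pvFuel (⟨P2, S2⟩ : pvUF)) ⟨P2, S2⟩ (pvCL eq) = (⟨P3, S3⟩, r2) := heq2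
      have hI1 : pvIsRoot (pvPf uf.parent) (pvC0 eq) r1 := ⟨n1, hc1, hr1⟩
      have hI2 : pvIsRoot (pvPf uf.parent) (pvCL eq) r2 := (hroots2 _ r2).mp ⟨n2, hc2, hr2⟩
      have hkey : r1 = r2 ↔ pvREq (pvPf uf.parent) (pvC0 eq) (pvCL eq) := by
        constructor
        · intro hh
          exact ⟨r1, hI1, hh ▸ hI2⟩
        · rintro ⟨r, hu, hv⟩
          rw [pvIsRoot_unique hu hI1] at hv
          exact pvIsRoot_unique hv hI2
      have hkey2 : r1 = r2 ↔ pvLead L (pvC0 eq) = pvLead L (pvCL eq) :=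
        hkey.trans (hrel _ _)
      have hroots31 : ∀ z ρ, pvIsRoot (pvPf P3) z ρ ↔ pvIsRoot (pvPf uf.parent) z ρ :=
        fun z ρ => (hroots3 z ρ).trans (hroots2 z ρ)
      have hcouple3 : pvCouple ⟨P3, S3⟩ L := by
        refine ⟨fun z => (hWF z).imp (fun r hh => (hroots31 z r).mpr hh), hnd3, hB, ?_⟩
        intro u v
        refine (Iff.trans ?_ (hrel u v))
        exact exists_congr fun r => and_congr (hroots31 u r) (hroots31 v r)
      by_cases hr12 : r1 = r2
      · have hL : (L.getD (pvC0 eq) (pvC0 eq) == L.getD (pvCL eq) (pvCL eq)) = true := by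
          rw [beq_iff_eq]
          exact hkey2.mp hr12
        simp only [pvCheck, e1, e2]
        simp [hq, hr12, hL]
      · have hL : (L.getD (pvC0 eq) (pvC0 eq) == L.getD (pvCL eq) (pvCL eq)) = false := by
          rw [beq_eq_false_iff_ne]
          exact fun hh => hr12 (hkey2.mpr hh)
        simp only [pvCheck, e1, e2]
        simp only [if_pos hq, if_neg hr12]
        rw [ih ⟨P3, S3⟩ L hcouple3]
        simp [hq, hL]
    · simp only [pvCheck, if_neg hq]
      rw [ih uf L ⟨hWF, hnd, hB, hrel⟩]
      have : (pvC1 eq == '!') = false := by simpa using hq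
      simp [this]

theorem pvCouple_init : pvCouple ⟨PySem.Dict.empty, PySem.Dict.empty⟩ PySem.Dict.empty := by
  have hpf : pvPf (PySem.Dict.empty : PySem.Dict Char Char) = fun z => z := by
    funext z
    exact PySem.Dict.getD_empty z z
  have hfix : ∀ z, pvPf (PySem.Dict.empty : PySem.Dict Char Char) z = z := fun z => by rw [hpf]
  refine ⟨fun z => ⟨z, ⟨0, rfl, hfix z⟩⟩, ?_, ⟨fun z => rfl, ?_, ?_⟩, ?_⟩
  · show (PySem.Dict.empty : PySem.Dict Char Char).keys.Nodup
    simp [PySem.Dict.keys_empty]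
  · intro z hc
    rw [PySem.Dict.contains_empty] at hc
    exact absurd hc (by simp)
  · show (PySem.Dict.empty : PySem.Dict Char Char).keys.Nodup
    simp [PySem.Dict.keys_empty]
  · intro u v
    constructor
    · rintro ⟨r, hu, hv⟩
      have h1 : r = u := pvIsRoot_of_fix (hfix u) hu
      have h2 : r = v := pvIsRoot_of_fix (hfix v) hv
      show pvLead PySem.Dict.empty u = pvLead PySem.Dict.empty v
      show (PySem.Dict.empty : PySem.Dict Char Char).getD u u = PySem.Dict.getD PySem.Dict.empty v v
      rw [PySem.Dict.getD_empty, PySem.Dict.getD_empty, ← h1, ← h2]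
    · intro hh
      have huv : u = v := by
        have h1 : pvLead (PySem.Dict.empty : PySem.Dict Char Char) u = u := PySem.Dict.getD_empty u u
        have h2 : pvLead (PySem.Dict.empty : PySem.Dict Char Char) v = v := PySem.Dict.getD_empty v v
        rw [h1, h2] at hh
        exact hh
      subst huv
      exact ⟨u, ⟨0, rfl, hfix u⟩, ⟨0, rfl, hfix u⟩⟩

-- ===== VERDICT (by name: the statement is the Claim_ definition above) =====
theorem equationsPossible_spec : Claim_equal_equationsPossible := by
  intro equations _ _
  unfold Spec_equationsPossible equationsPossible equationsPossible_alt
  exact pvCheck_eq equations _ _ (pvCouple_fold equations _ _ pvCouple_init)
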